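-- pv_equiv track=rewrite | github.com/antaris82/CNNA-Project | Repository/scripts/build_export_script_v1.8.py | strip_lean_comments
-- ===== SOURCE A (Python) =====
-- def strip_lean_comments(text: str) -> str:
--     out: list[str] = []
--     i = 0
--     n = len(text)
--     block_depth = 0
--     while i < n:
--         ch = text[i]
--         nxt = text[i + 1] if i + 1 < n else ""
--         if block_depth > 0:
--             if ch == "/" and nxt == "-":
--                 block_depth += 1
--                 i += 2
--                 continue
--             if ch == "-" and nxt == "/":
--                 block_depth -= 1
--                 i += 2
--                 continue
--             if ch == "\n":
--                 out.append("\n")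
--             i += 1
--             continue
--         if ch == "/" and nxt == "-":
--             block_depth = 1
--             i += 2
--             continue
--         if ch == "-" and nxt == "-":
--             i += 2
--             while i < n and text[i] != "\n":
--                 i += 1
--             continue
--         out.append(ch)
--         i += 1
--     return "".join(out)
-- ===== SOURCE B (Python) =====
-- def _pick(p: int, q: int):
--     """Earliest of two str.find results (-1 = absent): (position, is_first) or None."""
--     if p != -1 and (q == -1 or p < q):
--         return (p, True)
--     if q != -1:
--         return (q, False)
--     return None
--
--
-- def strip_lean_comments(text: str) -> str:
--     out: list[str] = []
--     i = 0
--     n = len(text)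
--     depth = 0
--     while i < n:
--         if depth == 0:
--             m = _pick(text.find('/-', i), text.find('--', i))
--             if m is None:
--                 out.append(text[i:])
--                 i = n
--             elif m[1]:  # block comment opens first
--                 out.append(text[i:m[0]])
--                 i = m[0] + 2
--                 depth = 1
--             else:  # line comment first: skip to newline, do not consume it
--                 out.append(text[i:m[0]])
--                 nl = text.find('\n', m[0] + 2)
--                 i = n if nl == -1 else nl
--         else:
--             m = _pick(text.find('/-', i), text.find('-/', i))
--             if m is None:
--                 out.append('\n' * text.count('\n', i, n))
--                 i = n
--             elif m[1]:  # nested open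
--                 out.append('\n' * text.count('\n', i, m[0]))
--                 i = m[0] + 2
--                 depth += 1
--             else:  # close
--                 out.append('\n' * text.count('\n', i, m[0]))
--                 i = m[0] + 2
--                 depth -= 1
--     return ''.join(out)
-- ===== Notes on version B (the rewrite author's own statement) =====
-- stated objective: faster
-- what changed: Replaced the per-character state machine by a marker-seeking scanner: str.find locates the earliest of the two relevant two-char markers, copies/skips whole segments at once (counting only newlines inside block comments), instead of inspecting every character in Python-level branches.
import Mathlib
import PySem

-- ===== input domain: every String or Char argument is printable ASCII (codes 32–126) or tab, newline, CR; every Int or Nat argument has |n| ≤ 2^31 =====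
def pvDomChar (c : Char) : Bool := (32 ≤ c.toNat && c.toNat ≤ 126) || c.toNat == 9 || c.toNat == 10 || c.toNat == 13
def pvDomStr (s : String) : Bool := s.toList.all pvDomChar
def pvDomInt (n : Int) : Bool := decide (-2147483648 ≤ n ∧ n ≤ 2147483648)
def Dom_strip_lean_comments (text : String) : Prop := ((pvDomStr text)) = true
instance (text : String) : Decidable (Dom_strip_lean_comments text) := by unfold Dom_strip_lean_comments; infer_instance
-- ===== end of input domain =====

-- B replaces A's per-character state machine by a marker-seeking scanner (find the
-- earliest two-char marker, copy/skip whole segments at once); objective: constant-factor speed in Python.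

-- ===== PORT A =====
-- inner `while i < n and text[i] != '\n'` loop of the line-comment branch
def pvSkipLine : List Char → List Char
  | [] => []
  | c :: r => if c = '\n' then c :: r else pvSkipLine r

theorem pvSkipLine_length_le : ∀ l : List Char, (pvSkipLine l).length ≤ l.length := by
  intro l
  induction l with
  | nil => simp [pvSkipLine]
  | cons c r ih =>
    simp only [pvSkipLine]
    split
    · simp
    · exact Nat.le_succ_of_le ih

-- A's main while loop: the suffix text[i:] is the list, block_depth the Nat state
def pvStripA : List Char → Nat → List Char
  | [], _ => []
  | c :: rest, d =>
    if 0 < d then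
      if c = '/' ∧ rest.head? = some '-' then pvStripA rest.tail (d + 1)
      else if c = '-' ∧ rest.head? = some '/' then pvStripA rest.tail (d - 1)
      else if c = '\n' then '\n' :: pvStripA rest d
      else pvStripA rest d
    else
      if c = '/' ∧ rest.head? = some '-' then pvStripA rest.tail 1
      else if c = '-' ∧ rest.head? = some '-' then pvStripA (pvSkipLine rest.tail) 0
      else c :: pvStripA rest 0
termination_by l _ => l.length
decreasing_by
  · have := List.length_tail (l := rest); simp
  · have := List.length_tail (l := rest); simp
  · simp
  · simp
  · have := List.length_tail (l := rest); simp
  · have h1 := pvSkipLine_length_le rest.tail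
    have h2 := List.length_tail (l := rest)
    simp; omega
  · simp

def strip_lean_comments (text : String) : String :=
  String.ofList (pvStripA text.toList 0)

-- ===== PORT B =====
-- text.find(two-char marker, i), relative to the suffix l = text[i:]; none = -1
def pvFind2 (a b : Char) : List Char → Option Nat
  | c1 :: c2 :: r => if c1 = a ∧ c2 = b then some 0 else (pvFind2 a b (c2 :: r)).map (· + 1)
  | _ => none

-- Source B's _pick: earliest of two find results, (position, is_first)
def pvPick (p q : Option Nat) : Option (Nat × Bool) :=
  match p, q with
  | some a, some b => if a < b then some (a, true) else some (b, false)
  | some a, none => some (a, true)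
  | none, some b => some (b, false)
  | none, none => none

-- '\n' * text.count('\n', i, j) over the corresponding segment
def pvNl (l : List Char) : List Char := l.filter (· = '\n')

theorem pvFind2_bound {a b : Char} : ∀ {l : List Char} {k : Nat},
    pvFind2 a b l = some k → k + 2 ≤ l.length := by
  intro l
  induction l with
  | nil => intro k h; simp [pvFind2] at h
  | cons c1 r ih =>
    intro k h
    match r with
    | [] => simp [pvFind2] at h
    | c2 :: r' =>
      simp only [pvFind2] at h
      split at h
      · cases h; simp
      · rcases Option.map_eq_some_iff.mp h with ⟨k', hk', rfl⟩
        have := ih hk'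
        simp at this ⊢
        omega

theorem pvPick_find_bound {a b c d : Char} {l : List Char} {k : Nat} {s : Bool}
    (h : pvPick (pvFind2 a b l) (pvFind2 c d l) = some (k, s)) : k + 2 ≤ l.length := by
  unfold pvPick at h
  split at h
  · split at h
    · cases h; exact pvFind2_bound (by assumption)
    · cases h; exact pvFind2_bound (by assumption)
  · cases h; exact pvFind2_bound (by assumption)
  · cases h; exact pvFind2_bound (by assumption)
  · cases h

mutual
-- B's loop, depth == 0 branch (l = text[i:])
def pvStripBN (l : List Char) : List Char :=
  match h : pvPick (pvFind2 '/' '-' l) (pvFind2 '-' '-' l) with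
  | none => l
  | some (k, true) => l.take k ++ pvStripBB (l.drop (k + 2)) 1
  | some (k, false) =>
      l.take k ++
        (match ((l.drop (k + 2)).findIdx? (· = '\n')) with
         | none => []
         | some q => pvStripBN ((l.drop (k + 2)).drop q))
termination_by l.length
decreasing_by
  · have := pvPick_find_bound h; simp; omega
  · have := pvPick_find_bound h; simp; omega

-- B's loop, depth > 0 branch
def pvStripBB (l : List Char) (d : Nat) : List Char :=
  match h : pvPick (pvFind2 '/' '-' l) (pvFind2 '-' '/' l) with
  | none => pvNl l
  | some (k, true) => pvNl (l.take k) ++ pvStripBB (l.drop (k + 2)) (d + 1)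
  | some (k, false) =>
      pvNl (l.take k) ++
        (if d = 1 then pvStripBN (l.drop (k + 2)) else pvStripBB (l.drop (k + 2)) (d - 1))
termination_by l.length
decreasing_by
  · have := pvPick_find_bound h; simp; omega
  · have := pvPick_find_bound h; simp; omega
  · have := pvPick_find_bound h; simp; omega
end

def strip_lean_comments_alt (text : String) : String :=
  String.ofList (pvStripBN text.toList)

-- ===== PRECONDITION & SPEC =====
def Spec_strip_lean_comments (text : String) (out : String) : Prop := out = strip_lean_comments_alt text
instance (text : String) (out : String) : Decidable (Spec_strip_lean_comments text out) := by unfold Spec_strip_lean_comments; infer_instance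

-- ===== CLAIM (what is proved, stated in full; the proofs are below) =====
def Claim_equal_strip_lean_comments : Prop := ∀ (text : String), Dom_strip_lean_comments text → Spec_strip_lean_comments text (strip_lean_comments text)

-- ===== LEMMAS AND PROOFS =====

theorem pvFind2_cons_shift {a b c : Char} {rest : List Char}
    (h : ¬(c = a ∧ rest.head? = some b)) :
    pvFind2 a b (c :: rest) = (pvFind2 a b rest).map (· + 1) := by
  match rest with
  | [] => simp [pvFind2]
  | c2 :: r =>
    simp only [pvFind2]
    split
    · rename_i hc
      exact absurd ⟨hc.1, by simp [hc.2]⟩ h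
    · rfl

theorem pvPick_map {p q : Option Nat} :
    pvPick (p.map (· + 1)) (q.map (· + 1)) = (pvPick p q).map (fun x => (x.1 + 1, x.2)) := by
  cases p with
  | none => cases q <;> rfl
  | some a =>
    cases q with
    | none => rfl
    | some b =>
      simp only [Option.map_some, pvPick, Nat.add_lt_add_iff_right]
      split <;> rfl

-- unfolding lemmas for B at a known pick value --------------------------------

theorem pvStripBN_eq_none {l : List Char}
    (h : pvPick (pvFind2 '/' '-' l) (pvFind2 '-' '-' l) = none) : pvStripBN l = l := by
  rw [pvStripBN.eq_def]
  split <;> simp_all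

theorem pvStripBN_eq_true {l : List Char} {k : Nat}
    (h : pvPick (pvFind2 '/' '-' l) (pvFind2 '-' '-' l) = some (k, true)) :
    pvStripBN l = l.take k ++ pvStripBB (l.drop (k + 2)) 1 := by
  rw [pvStripBN.eq_def]
  split <;> simp_all

theorem pvStripBN_eq_false {l : List Char} {k : Nat}
    (h : pvPick (pvFind2 '/' '-' l) (pvFind2 '-' '-' l) = some (k, false)) :
    pvStripBN l = l.take k ++
        (match ((l.drop (k + 2)).findIdx? (· = '\n')) with
         | none => []
         | some q => pvStripBN ((l.drop (k + 2)).drop q)) := by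
  rw [pvStripBN.eq_def]
  split <;> simp_all

theorem pvStripBB_eq_none {l : List Char} {d : Nat}
    (h : pvPick (pvFind2 '/' '-' l) (pvFind2 '-' '/' l) = none) : pvStripBB l d = pvNl l := by
  rw [pvStripBB.eq_def]
  split <;> simp_all

theorem pvStripBB_eq_true {l : List Char} {d k : Nat}
    (h : pvPick (pvFind2 '/' '-' l) (pvFind2 '-' '/' l) = some (k, true)) :
    pvStripBB l d = pvNl (l.take k) ++ pvStripBB (l.drop (k + 2)) (d + 1) := by
  rw [pvStripBB.eq_def]
  split <;> simp_all

theorem pvStripBB_eq_false {l : List Char} {d k : Nat}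
    (h : pvPick (pvFind2 '/' '-' l) (pvFind2 '-' '/' l) = some (k, false)) :
    pvStripBB l d = pvNl (l.take k) ++
        (if d = 1 then pvStripBN (l.drop (k + 2)) else pvStripBB (l.drop (k + 2)) (d - 1)) := by
  rw [pvStripBB.eq_def]
  split <;> simp_all

-- step lemmas for B -----------------------------------------------------------

theorem pvStripBN_nil : pvStripBN [] = [] := by
  exact pvStripBN_eq_none rfl

theorem pvStripBB_nil (d : Nat) : pvStripBB [] d = [] := by
  rw [pvStripBB_eq_none rfl]; rfl

theorem pvStripBN_open (r : List Char) : pvStripBN ('/' :: '-' :: r) = pvStripBB r 1 := by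
  have key : pvPick (pvFind2 '/' '-' ('/' :: '-' :: r)) (pvFind2 '-' '-' ('/' :: '-' :: r))
      = some (0, true) := by
    have hB : pvFind2 '/' '-' ('/' :: '-' :: r) = some 0 := by simp [pvFind2]
    have hL := pvFind2_cons_shift (a := '-') (b := '-') (c := '/') (rest := '-' :: r) (by simp)
    rw [hB, hL]
    cases pvFind2 '-' '-' ('-' :: r) <;> simp [pvPick]
  rw [pvStripBN_eq_true key]
  simp

theorem pvStripBN_line (r : List Char) :
    pvStripBN ('-' :: '-' :: r) =
      (match r.findIdx? (· = '\n') with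
       | none => []
       | some q => pvStripBN (r.drop q)) := by
  have key : pvPick (pvFind2 '/' '-' ('-' :: '-' :: r)) (pvFind2 '-' '-' ('-' :: '-' :: r))
      = some (0, false) := by
    have hL : pvFind2 '-' '-' ('-' :: '-' :: r) = some 0 := by simp [pvFind2]
    have hB := pvFind2_cons_shift (a := '/') (b := '-') (c := '-') (rest := '-' :: r) (by simp)
    rw [hB, hL]
    cases pvFind2 '/' '-' ('-' :: r) <;> simp [pvPick]
  rw [pvStripBN_eq_false key]
  simp

theorem pvStripBB_open (r : List Char) (d : Nat) :
    pvStripBB ('/' :: '-' :: r) d = pvStripBB r (d + 1) := by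
  have key : pvPick (pvFind2 '/' '-' ('/' :: '-' :: r)) (pvFind2 '-' '/' ('/' :: '-' :: r))
      = some (0, true) := by
    have hB : pvFind2 '/' '-' ('/' :: '-' :: r) = some 0 := by simp [pvFind2]
    have hC := pvFind2_cons_shift (a := '-') (b := '/') (c := '/') (rest := '-' :: r) (by simp)
    rw [hB, hC]
    cases pvFind2 '-' '/' ('-' :: r) <;> simp [pvPick]
  rw [pvStripBB_eq_true key]
  simp [pvNl]

theorem pvStripBB_close (r : List Char) (d : Nat) :
    pvStripBB ('-' :: '/' :: r) d = (if d = 1 then pvStripBN r else pvStripBB r (d - 1)) := by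
  have key : pvPick (pvFind2 '/' '-' ('-' :: '/' :: r)) (pvFind2 '-' '/' ('-' :: '/' :: r))
      = some (0, false) := by
    have hC : pvFind2 '-' '/' ('-' :: '/' :: r) = some 0 := by simp [pvFind2]
    have hB := pvFind2_cons_shift (a := '/') (b := '-') (c := '-') (rest := '/' :: r) (by simp)
    rw [hB, hC]
    cases pvFind2 '/' '-' ('/' :: r) <;> simp [pvPick]
  rw [pvStripBB_eq_false key]
  simp [pvNl]

theorem pvStripBN_cons {c : Char} {rest : List Char}
    (h1 : ¬(c = '/' ∧ rest.head? = some '-')) (h2 : ¬(c = '-' ∧ rest.head? = some '-')) :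
    pvStripBN (c :: rest) = c :: pvStripBN rest := by
  have key : pvPick (pvFind2 '/' '-' (c :: rest)) (pvFind2 '-' '-' (c :: rest))
      = (pvPick (pvFind2 '/' '-' rest) (pvFind2 '-' '-' rest)).map (fun x => (x.1 + 1, x.2)) := by
    rw [pvFind2_cons_shift h1, pvFind2_cons_shift h2, pvPick_map]
  cases hP : pvPick (pvFind2 '/' '-' rest) (pvFind2 '-' '-' rest) with
  | none =>
    rw [pvStripBN_eq_none (by rw [key, hP]; rfl), pvStripBN_eq_none hP]
  | some ks =>
    obtain ⟨k, s⟩ := ks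
    cases s with
    | true =>
      rw [pvStripBN_eq_true (l := c :: rest) (k := k + 1) (by rw [key, hP]; rfl),
          pvStripBN_eq_true hP]
      have hd : (c :: rest).drop (k + 1 + 2) = rest.drop (k + 2) := by
        have : k + 1 + 2 = (k + 2) + 1 := by omega
        rw [this, List.drop_succ_cons]
      rw [hd, List.take_succ_cons, List.cons_append]
    | false =>
      rw [pvStripBN_eq_false (l := c :: rest) (k := k + 1) (by rw [key, hP]; rfl),
          pvStripBN_eq_false hP]
      have hd : (c :: rest).drop (k + 1 + 2) = rest.drop (k + 2) := by
        have : k + 1 + 2 = (k + 2) + 1 := by omega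
        rw [this, List.drop_succ_cons]
      rw [hd, List.take_succ_cons, List.cons_append]

theorem pvStripBB_cons {c : Char} {rest : List Char} (d : Nat)
    (h1 : ¬(c = '/' ∧ rest.head? = some '-')) (h2 : ¬(c = '-' ∧ rest.head? = some '/')) :
    pvStripBB (c :: rest) d = (if c = '\n' then ['\n'] else []) ++ pvStripBB rest d := by
  have key : pvPick (pvFind2 '/' '-' (c :: rest)) (pvFind2 '-' '/' (c :: rest))
      = (pvPick (pvFind2 '/' '-' rest) (pvFind2 '-' '/' rest)).map (fun x => (x.1 + 1, x.2)) := by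
    rw [pvFind2_cons_shift h1, pvFind2_cons_shift h2, pvPick_map]
  have hnl : ∀ m : List Char, pvNl (c :: m) = (if c = '\n' then ['\n'] else []) ++ pvNl m := by
    intro m
    by_cases hc : c = '\n' <;> simp [pvNl, hc]
  cases hP : pvPick (pvFind2 '/' '-' rest) (pvFind2 '-' '/' rest) with
  | none =>
    rw [pvStripBB_eq_none (by rw [key, hP]; rfl), pvStripBB_eq_none hP, hnl]
  | some ks =>
    obtain ⟨k, s⟩ := ks
    have hd : (c :: rest).drop (k + 1 + 2) = rest.drop (k + 2) := by
      have : k + 1 + 2 = (k + 2) + 1 := by omega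
      rw [this, List.drop_succ_cons]
    cases s with
    | true =>
      rw [pvStripBB_eq_true (l := c :: rest) (d := d) (k := k + 1) (by rw [key, hP]; rfl),
          pvStripBB_eq_true (d := d) hP]
      rw [hd, List.take_succ_cons, hnl, List.append_assoc]
    | false =>
      rw [pvStripBB_eq_false (l := c :: rest) (d := d) (k := k + 1) (by rw [key, hP]; rfl),
          pvStripBB_eq_false (d := d) hP]
      rw [hd, List.take_succ_cons, hnl, List.append_assoc]

theorem pvSkipLine_eq (l : List Char) :
    pvSkipLine l = (match l.findIdx? (· = '\n') with
                    | none => []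
                    | some q => l.drop q) := by
  induction l with
  | nil => simp [pvSkipLine]
  | cons c r ih =>
    simp only [pvSkipLine, List.findIdx?_cons]
    by_cases hc : c = '\n'
    · simp [hc]
    · simp only [hc, decide_eq_true_eq, if_false]
      rw [ih]
      cases hq : r.findIdx? (· = '\n') <;> simp

-- main induction --------------------------------------------------------------

theorem pv_main : ∀ (n : Nat) (l : List Char), l.length ≤ n →
    (pvStripA l 0 = pvStripBN l) ∧ (∀ d, pvStripA l (d + 1) = pvStripBB l (d + 1)) := by
  intro n
  induction n with
  | zero =>
    intro l hl
    have : l = [] := List.eq_nil_of_length_eq_zero (Nat.le_zero.mp hl)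
    subst this
    exact ⟨by rw [pvStripA, pvStripBN_nil], fun d => by rw [pvStripA, pvStripBB_nil]⟩
  | succ n ih =>
    intro l hl
    match l with
    | [] => exact ⟨by rw [pvStripA, pvStripBN_nil], fun d => by rw [pvStripA, pvStripBB_nil]⟩
    | c :: rest =>
      have hr : rest.length ≤ n := by simpa using hl
      constructor
      · -- normal mode
        by_cases h1 : c = '/' ∧ rest.head? = some '-'
        · obtain ⟨rfl, hh⟩ := h1
          cases rest with
          | nil => simp at hh
          | cons c2 r =>
            have : c2 = '-' := by simpa using hh
            subst this
            rw [pvStripA, pvStripBN_open]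
            rw [if_neg (by omega : ¬ (0:Nat) > 0)]
            rw [if_pos (by simp : ('/':Char) = '/' ∧ (('-':Char) :: r).head? = some '-')]
            exact (ih r (by simp at hr; omega)).2 0
        · by_cases h2 : c = '-' ∧ rest.head? = some '-'
          · obtain ⟨rfl, hh⟩ := h2
            cases rest with
            | nil => simp at hh
            | cons c2 r =>
              have : c2 = '-' := by simpa using hh
              subst this
              rw [pvStripA, pvStripBN_line]
              rw [if_neg (by omega : ¬ (0:Nat) > 0)]
              rw [if_neg (by simp), if_pos (by simp)]
              simp only [List.tail_cons]
              rw [pvSkipLine_eq]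
              cases hq : r.findIdx? (· = '\n') with
              | none => simp [pvStripA]
              | some q =>
                simp only
                exact (ih (r.drop q) (by simp at hr ⊢; omega)).1
          · rw [pvStripA, pvStripBN_cons h1 h2]
            rw [if_neg (by omega : ¬ (0:Nat) > 0), if_neg h1, if_neg h2]
            rw [(ih rest hr).1]
      · -- block mode
        intro d
        by_cases h1 : c = '/' ∧ rest.head? = some '-'
        · obtain ⟨rfl, hh⟩ := h1
          cases rest with
          | nil => simp at hh
          | cons c2 r =>
            have : c2 = '-' := by simpa using hh
            subst this
            rw [pvStripA, pvStripBB_open]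
            rw [if_pos (by omega : (0:Nat) < d + 1)]
            rw [if_pos (by simp : ('/':Char) = '/' ∧ (('-':Char) :: r).head? = some '-')]
            exact (ih r (by simp at hr; omega)).2 (d + 1)
        · by_cases h2 : c = '-' ∧ rest.head? = some '/'
          · obtain ⟨rfl, hh⟩ := h2
            cases rest with
            | nil => simp at hh
            | cons c2 r =>
              have : c2 = '/' := by simpa using hh
              subst this
              rw [pvStripA, pvStripBB_close]
              rw [if_pos (by omega : (0:Nat) < d + 1)]
              rw [if_neg (by simp), if_pos (by simp)]
              simp only [List.tail_cons, Nat.add_sub_cancel]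
              cases d with
              | zero => rw [if_pos rfl]; exact (ih r (by simp at hr; omega)).1
              | succ d' =>
                rw [if_neg (by omega)]
                have := (ih r (by simp at hr; omega)).2 d'
                simpa using this
          · rw [pvStripA, pvStripBB_cons (d + 1) h1 h2]
            rw [if_pos (by omega : (0:Nat) < d + 1), if_neg h1, if_neg h2]
            by_cases hc : c = '\n'
            · subst hc
              rw [if_pos rfl, if_pos rfl, (ih rest hr).2 d]
              rfl
            · rw [if_neg hc, if_neg hc, (ih rest hr).2 d]
              rfl

-- ===== VERDICT (by name: the statement is the Claim_ definition above) =====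
theorem strip_lean_comments_spec : Claim_equal_strip_lean_comments := by
  intro text _
  unfold Spec_strip_lean_comments strip_lean_comments strip_lean_comments_alt
  rw [(pv_main text.toList.length text.toList le_rfl).1]
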